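-- pv_equiv track=rewrite | github.com/serafinmoral/tablasat | Backtrakinggrupos.py | obtenerVariable
-- ===== SOURCE A (Python) =====
-- def obtenerVariable(formula):
--         z = dict()
--         nc = len(formula)
--         for cla in formula:
--             posclau = frozenset(map(abs,cla))
--             for x in posclau:
--                 if x in z:
--                     z[x].add(posclau)
--                 else:
--                     z[x]={posclau}
--         best=len(formula)**3
--         nbest=-1
--         for i in z:
--             conjunto = set({i})
--             l=len(z[i])
--             for x in z[i]:
--                 conjunto.update(x)
--                 aux = len(conjunto)*nc+l
--             if(aux<best) :
--                 nbest = i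
--                 best = aux
--         return nbest
-- ===== SOURCE B (Python) =====
-- def obtenerVariable(formula):
--     nc = len(formula)
--     neigh = {}   # variable -> set of co-occurring variables (union of its distinct clauses)
--     count = {}   # variable -> number of distinct clauses containing it
--     seen = set() # distinct clause frozensets processed so far
--     for cla in formula:
--         f = frozenset(map(abs, cla))
--         if f in seen:
--             continue
--         seen.add(f)
--         for x in f:
--             if x in neigh:
--                 neigh[x].update(f)
--                 count[x] += 1
--             else:
--                 neigh[x] = set(f)
--                 count[x] = 1
--     best = nc ** 3
--     nbest = -1
--     for i in neigh:
--         aux = len(neigh[i]) * nc + count[i]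
--         if aux < best:
--             nbest = i
--             best = aux
--     return nbest
-- ===== Notes on version B (the rewrite author's own statement) =====
-- stated objective: alternative
-- what changed: B replaces A's per-variable set-of-clause-frozensets plus a second nested union pass with a single indexing pass that maintains a flat co-occurrence set and a distinct-clause counter per variable (global dedup of equal clause frozensets), so scoring becomes a flat loop.
import Mathlib
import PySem

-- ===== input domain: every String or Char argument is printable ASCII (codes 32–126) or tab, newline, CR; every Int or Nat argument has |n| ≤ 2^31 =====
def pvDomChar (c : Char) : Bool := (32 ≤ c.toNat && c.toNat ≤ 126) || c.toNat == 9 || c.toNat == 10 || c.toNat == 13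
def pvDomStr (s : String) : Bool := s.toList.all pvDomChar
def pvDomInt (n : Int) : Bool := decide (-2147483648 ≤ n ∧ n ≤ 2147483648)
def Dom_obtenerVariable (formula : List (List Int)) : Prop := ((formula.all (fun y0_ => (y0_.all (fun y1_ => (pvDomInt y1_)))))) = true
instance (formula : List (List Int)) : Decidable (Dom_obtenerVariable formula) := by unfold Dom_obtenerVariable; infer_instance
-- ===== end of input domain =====

-- B is a one-pass re-implementation (flat per-variable union + distinct-clause counter) of A's
-- set-of-frozensets construction with a later nested union pass; return values agree everywhere.
--
-- SHARED HASH-ORDER HELPERS. A's result can depend on CPython's iteration order over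
-- 'frozenset(map(abs, cla))' (it fixes dict-key insertion order, which breaks score ties).
-- For int elements that order is deterministic; fsOrder simulates CPython's set hash table
-- exactly (hash(x) = x for 0 ≤ x < 2^61, open addressing with 9 linear probes then
-- i = i*5+1+perturb, tables of power-of-two size growing 4x at fill*5 ≥ mask*3), validated
-- against CPython. Both ports use it, as they would use any PySem primitive. The fuel /
-- overflow branches only make the functions total; they are never reached (a table always
-- keeps empty slots), and the permutation lemmas below hold regardless.

-- first empty slot among tab[i..i+probes], scanning left to right (CPython's LINEAR_PROBES scan)
def fsScanEmpty (tab : List (Option Int)) : Nat → Nat → Option Nat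
  | i, 0 => if tab.getD i (some 0) = none then some i else none
  | i, p+1 => if tab.getD i (some 0) = none then some i else fsScanEmpty tab (i+1) p

-- CPython probe sequence: linear scan when i+9 ≤ mask, else just slot i; then perturb step
def fsProbe (tab : List (Option Int)) : Nat → Nat → Nat → Option Nat
  | _, _, 0 => none
  | i, perturb, fuel+1 =>
    let mask := tab.length - 1
    let probes := if i + 9 ≤ mask then 9 else 0
    match fsScanEmpty tab i probes with
    | some j => some j
    | none => fsProbe tab ((i*5+1+(perturb >>> 5)) % tab.length) (perturb >>> 5) fuel

def fsInsert (tab : List (Option Int)) (x : Int) : Option (List (Option Int)) :=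
  match fsProbe tab (x.toNat % tab.length) x.toNat (tab.length + 16) with
  | some j => some (tab.set j (some x))
  | none => none

-- newsize = 8; while newsize <= minused: newsize <<= 1
def fsGrow : Nat → Nat → Nat → Nat
  | s, _, 0 => s
  | s, m, fuel+1 => if m < s then s else fsGrow (2*s) m fuel

-- rebuild on resize: reinsert occupied entries in slot order (set_insert_clean)
def fsReinsert (entries : List Int) (tab : List (Option Int)) : List (Option Int) × List Int :=
  entries.foldl (fun st x =>
    match fsInsert st.1 x with
    | some t => (t, st.2)
    | none => (st.1, st.2 ++ [x])) (tab, [])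

-- one set_add_entry of a NEW element: insert, bump fill, resize at fill*5 ≥ mask*3
def fsAddStep (st : List (Option Int) × Nat × List Int) (x : Int) : List (Option Int) × Nat × List Int :=
  match fsInsert st.1 x with
  | none => (st.1, st.2.1, st.2.2 ++ [x])
  | some t =>
    let fill := st.2.1 + 1
    if (t.length - 1) * 3 ≤ fill * 5 then
      let minused := if 50000 < fill then fill * 2 else fill * 4
      let r := fsReinsert (t.filterMap id) (List.replicate (fsGrow 8 minused (minused+1)) none)
      (r.1, fill, st.2.2 ++ r.2)
    else (t, fill, st.2.2)

-- iteration order of frozenset(xs): insert first occurrences in order, read table in slot order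
def fsOrder (xs : List Int) : List Int :=
  let st := (PySem.List.dedup xs).foldl fsAddStep (List.replicate 8 none, 0, [])
  st.1.filterMap id ++ st.2.2

def pyAbs (v : Int) : Int := (v.natAbs : Int)

-- canonical representative of the frozenset frozenset(map(abs, cla)): its sorted element list.
-- Exact for Python's frozenset equality: two frozensets are == iff their sorted element lists agree.
def canonOf (cla : List Int) : List Int := (fsOrder (cla.map pyAbs)).mergeSort (· ≤ ·)

-- ===== PORT A =====
-- inner loop body: 'if x in z: z[x].add(posclau) else: z[x] = {posclau}' (frozensets as canon lists)
def aInner (canon : List Int) (z : PySem.Dict Int (PySem.Set (List Int))) (x : Int) :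
    PySem.Dict Int (PySem.Set (List Int)) :=
  match z.get? x with
  | some s => z.insert x (PySem.Set.add s canon)
  | none => z.insert x (PySem.Set.ofList [canon])

-- 'posclau = frozenset(map(abs,cla)); for x in posclau: …'
def aClause (z : PySem.Dict Int (PySem.Set (List Int))) (cla : List Int) :
    PySem.Dict Int (PySem.Set (List Int)) :=
  (fsOrder (cla.map pyAbs)).foldl (aInner (canonOf cla)) z

def obtenerVariable (formula : List (List Int)) : Int :=
  let nc : Int := (formula.length : Int)
  let z := formula.foldl aClause PySem.Dict.empty
  -- best = len(formula)**3; nbest = -1; scoring loop. aux is assigned inside the clause loop;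
  -- z[i] is never empty (a key is only created together with a clause), so the 0 seed for aux
  -- is never the returned aux, mirroring Python (where an empty z[i] would be a NameError).
  let res : Int × Int := z.keys.foldl (fun st i =>
      let zi := z.getD i PySem.Set.empty
      let l : Int := (zi.length : Int)
      let ca := zi.foldl (fun (p : PySem.Set Int × Int) c =>
          let conj := PySem.Set.update p.1 c
          (conj, (conj.length : Int) * nc + l)) (PySem.Set.ofList [i], 0)
      if ca.2 < st.1 then (ca.2, i) else st)
    (nc ^ 3, -1)
  res.2

-- ===== PORT B =====
-- inner loop body: 'neigh[x].update(f); count[x] += 1' / 'neigh[x] = set(f); count[x] = 1'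
-- (count[x] += 1 overwrites an existing key in place = insert of getD+1)
def bInner (f : List Int) (p : PySem.Dict Int (PySem.Set Int) × PySem.Dict Int Int) (x : Int) :
    PySem.Dict Int (PySem.Set Int) × PySem.Dict Int Int :=
  match p.1.get? x with
  | some s => (p.1.insert x (PySem.Set.update s f), p.2.insert x (p.2.getD x 0 + 1))
  | none => (p.1.insert x (PySem.Set.ofList f), p.2.insert x 1)

-- one clause of B's single pass: global dedup of equal frozensets, then the flat updates
def bClause (st : PySem.Dict Int (PySem.Set Int) × PySem.Dict Int Int × PySem.Set (List Int))
    (cla : List Int) :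
    PySem.Dict Int (PySem.Set Int) × PySem.Dict Int Int × PySem.Set (List Int) :=
  let f := fsOrder (cla.map pyAbs)
  let canon := canonOf cla
  if PySem.Set.contains st.2.2 canon then st
  else
    let p := f.foldl (bInner f) (st.1, st.2.1)
    (p.1, p.2, PySem.Set.add st.2.2 canon)

def obtenerVariable_alt (formula : List (List Int)) : Int :=
  let nc : Int := (formula.length : Int)
  let st := formula.foldl bClause (PySem.Dict.empty, PySem.Dict.empty, PySem.Set.empty)
  let res : Int × Int := st.1.keys.foldl (fun b i =>
      let aux := ((st.1.getD i PySem.Set.empty).length : Int) * nc + st.2.1.getD i 0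
      if aux < b.1 then (aux, i) else b)
    (nc ^ 3, -1)
  res.2

-- ===== PRECONDITION & SPEC =====
def Spec_obtenerVariable (formula : List (List Int)) (out : Int) : Prop := out = obtenerVariable_alt formula
instance (formula : List (List Int)) (out : Int) : Decidable (Spec_obtenerVariable formula out) := by unfold Spec_obtenerVariable; infer_instance

-- ===== CLAIM (what is proved, stated in full; the proofs are below) =====
def Claim_equal_obtenerVariable : Prop := ∀ (formula : List (List Int)), Dom_obtenerVariable formula → Spec_obtenerVariable formula (obtenerVariable formula)

-- ===== LEMMAS AND PROOFS =====
lemma filterMap_set_perm (x : Int) : ∀ (tab : List (Option Int)) (j : Nat),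
    tab[j]? = some none →
    ((tab.set j (some x)).filterMap id).Perm (x :: tab.filterMap id) := by
  intro tab
  induction tab with
  | nil => intro j h; simp at h
  | cons a t ih =>
    intro j h
    cases j with
    | zero =>
      simp at h; subst h
      simp [List.set]
    | succ j =>
      simp at h
      have hp := ih j h
      cases a with
      | none => simpa [List.set, List.filterMap_cons] using hp
      | some v =>
        simp only [List.set, List.filterMap_cons, id]
        exact (hp.cons v).trans (List.Perm.swap x v _)

lemma fsScanEmpty_spec : ∀ (p i j : Nat) (tab : List (Option Int)),
    fsScanEmpty tab i p = some j → tab[j]? = some none := by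
  intro p
  induction p with
  | zero =>
    intro i j tab h
    simp [fsScanEmpty] at h
    obtain ⟨h1, h2⟩ := h
    subst h2
    cases hg : tab[i]? with
    | none => simp [hg] at h1
    | some o => simp [hg] at h1; simp [h1]
  | succ p ih =>
    intro i j tab h
    simp only [fsScanEmpty] at h
    split at h
    · rename_i h1
      cases h; cases hg : tab[i]? with
      | none => simp [hg] at h1
      | some o => simp [hg] at h1; simp [h1]
    · exact ih _ _ _ h

lemma fsProbe_spec : ∀ (fuel i pe j : Nat) (tab : List (Option Int)),
    fsProbe tab i pe fuel = some j → tab[j]? = some none := by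
  intro fuel
  induction fuel with
  | zero => intro i pe j tab h; simp [fsProbe] at h
  | succ fuel ih =>
    intro i pe j tab h
    simp only [fsProbe] at h
    split at h
    · rename_i heq; cases h; exact fsScanEmpty_spec _ _ _ _ heq
    · exact ih _ _ _ _ h

lemma fsInsert_perm {tab t : List (Option Int)} {x : Int} (h : fsInsert tab x = some t) :
    (t.filterMap id).Perm (x :: tab.filterMap id) := by
  unfold fsInsert at h
  split at h
  · rename_i j hp; cases h; exact filterMap_set_perm x tab j (fsProbe_spec _ _ _ _ _ hp)
  · cases h
lemma fsReinsert_aux : ∀ (es : List Int) (tab : List (Option Int)) (ov : List Int),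
    ((es.foldl (fun st x =>
        match fsInsert st.1 x with
        | some t => (t, st.2)
        | none => (st.1, st.2 ++ [x])) (tab, ov)).1.filterMap id ++
     (es.foldl (fun st x =>
        match fsInsert st.1 x with
        | some t => (t, st.2)
        | none => (st.1, st.2 ++ [x])) (tab, ov)).2).Perm
      (tab.filterMap id ++ ov ++ es) := by
  intro es
  induction es with
  | nil => intro tab ov; simp
  | cons x es ih =>
    intro tab ov
    simp only [List.foldl_cons]
    cases hi : fsInsert tab x with
    | none =>
      refine (ih tab (ov ++ [x])).trans ?_
      simp [List.append_assoc]
    | some t =>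
      refine (ih t ov).trans ?_
      have h1 := fsInsert_perm hi
      have h2 : (t.filterMap id ++ ov ++ es).Perm (x :: (tab.filterMap id ++ ov ++ es)) := by
        have := h1.append_right (ov ++ es)
        simpa [List.append_assoc] using this
      have h3 : (x :: (tab.filterMap id ++ ov ++ es)).Perm (tab.filterMap id ++ ov ++ x :: es) := by
        have := (List.perm_middle (a := x) (l₁ := tab.filterMap id ++ ov) (l₂ := es)).symm
        simpa [List.append_assoc] using this
      exact h2.trans h3

lemma fsReinsert_perm (es : List Int) (tab : List (Option Int)) :
    ((fsReinsert es tab).1.filterMap id ++ (fsReinsert es tab).2).Perm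
      (tab.filterMap id ++ es) := by
  have := fsReinsert_aux es tab []
  simpa using this
lemma filterMap_replicate_none (n : Nat) :
    (List.replicate n (none : Option Int)).filterMap id = [] := by
  simp

lemma contents_resize (es : List Int) (tb : List (Option Int)) (ov : List Int) :
    ((fsReinsert es tb).1.filterMap id ++ (ov ++ (fsReinsert es tb).2)).Perm
      (tb.filterMap id ++ es ++ ov) := by
  have h2 := fsReinsert_perm es tb
  have hcomm : ((fsReinsert es tb).1.filterMap id ++ (ov ++ (fsReinsert es tb).2)).Perm
      (((fsReinsert es tb).1.filterMap id ++ (fsReinsert es tb).2) ++ ov) := by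
    refine (List.Perm.append_left _ List.perm_append_comm).trans ?_
    simp [List.append_assoc]
  exact hcomm.trans (h2.append_right ov)

lemma fsAddStep_perm (st : List (Option Int) × Nat × List Int) (x : Int) :
    ((fsAddStep st x).1.filterMap id ++ (fsAddStep st x).2.2).Perm
      (x :: (st.1.filterMap id ++ st.2.2)) := by
  obtain ⟨tab, fill, ov⟩ := st
  unfold fsAddStep
  cases hi : fsInsert tab x with
  | none =>
    simp only []
    have := (List.perm_middle (a := x) (l₁ := tab.filterMap id ++ ov) (l₂ := ([] : List Int)))
    simpa [List.append_assoc] using this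
  | some t =>
    have h1 := fsInsert_perm hi
    simp only []
    split
    · refine (contents_resize (t.filterMap id) _ ov).trans ?_
      rw [filterMap_replicate_none]
      simpa using h1.append_right ov
    · exact by simpa using h1.append_right ov

lemma fsOrder_aux : ∀ (l : List Int) (st : List (Option Int) × Nat × List Int),
    ((l.foldl fsAddStep st).1.filterMap id ++ (l.foldl fsAddStep st).2.2).Perm
      (st.1.filterMap id ++ st.2.2 ++ l) := by
  intro l
  induction l with
  | nil => intro st; simp
  | cons x l ih =>
    intro st
    simp only [List.foldl_cons]
    refine (ih (fsAddStep st x)).trans ?_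
    have h1 := fsAddStep_perm st x
    refine (h1.append_right l).trans ?_
    have := (List.perm_middle (a := x) (l₁ := st.1.filterMap id ++ st.2.2) (l₂ := l)).symm
    simpa using this

lemma fsOrder_perm (xs : List Int) : (fsOrder xs).Perm (PySem.List.dedup xs) := by
  unfold fsOrder
  have := fsOrder_aux (PySem.List.dedup xs) (List.replicate 8 none, 0, [])
  simpa [filterMap_replicate_none] using this
lemma fsOrder_nodup (xs : List Int) : (fsOrder xs).Nodup :=
  (fsOrder_perm xs).nodup_iff.mpr (PySem.List.nodup_dedup xs)

lemma mem_canonOf {cla : List Int} {a : Int} :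
    a ∈ canonOf cla ↔ a ∈ fsOrder (cla.map pyAbs) := by
  unfold canonOf; exact List.mem_mergeSort

lemma keys_insert_eq_add {ν : Type} (d : PySem.Dict Int ν) (k : Int) (v : ν) :
    (d.insert k v).keys = PySem.Set.add d.keys k := by
  by_cases h : d.contains k = true
  · rw [PySem.Dict.keys_insert_of_contains _ _ h,
      PySem.Set.add_of_mem ((PySem.Dict.contains_iff_mem_keys d k).mp h)]
  · have h' : d.contains k = false := by simpa using h
    rw [PySem.Dict.keys_insert_of_not_contains _ _ h',
      PySem.Set.add_of_not_mem (fun hm => h ((PySem.Dict.contains_iff_mem_keys d k).mpr hm))]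

lemma insert_get_self {ν : Type} (d : PySem.Dict Int ν) (k : Int) (v : ν)
    (hnd : d.keys.Nodup) (h : d.get? k = some v) : d.insert k v = d := by
  apply PySem.Dict.ext
  have hc : d.contains k = true := by
    rw [PySem.Dict.contains_eq_isSome_get?, h]; rfl
  rw [PySem.Dict.items_insert_of_contains _ _ hc]
  conv_rhs => rw [← List.map_id d.items]
  apply List.map_congr_left
  intro p hp
  obtain ⟨p1, p2⟩ := p
  by_cases hpk : p1 = k
  · subst hpk
    have hkv : d.get? p1 = some p2 := PySem.Dict.get?_of_mem_items _ hp hnd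
    rw [h] at hkv
    have hv : v = p2 := Option.some_injective _ hkv
    simp [hv]
  · simp [hpk]
lemma aInner_get (canon : List Int) (z : PySem.Dict Int (PySem.Set (List Int))) (x y : Int) :
    (aInner canon z x).get? y =
      if y = x then
        some (match z.get? x with
              | some s => PySem.Set.add s canon
              | none => PySem.Set.ofList [canon])
      else z.get? y := by
  unfold aInner
  cases z.get? x <;> simp [PySem.Dict.get?_insert]

lemma aInner_keys (canon : List Int) (z : PySem.Dict Int (PySem.Set (List Int))) (x : Int) :
    (aInner canon z x).keys = PySem.Set.add z.keys x := by
  unfold aInner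
  cases h : z.get? x <;> exact keys_insert_eq_add _ _ _

lemma aFold_get_not_mem (canon : List Int) : ∀ (f : List Int) z (y : Int), y ∉ f →
    (f.foldl (aInner canon) z).get? y = z.get? y := by
  intro f
  induction f with
  | nil => intro z y _; rfl
  | cons x t ih =>
    intro z y hy
    simp only [List.foldl_cons]
    rw [ih _ y (fun h => hy (List.mem_cons_of_mem _ h)),
      aInner_get, if_neg (fun h => hy (by rw [h]; exact List.mem_cons_self))]

lemma aFold_get_mem (canon : List Int) : ∀ (f : List Int) z (y : Int), f.Nodup → y ∈ f →
    (f.foldl (aInner canon) z).get? y =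
      some (match z.get? y with
            | some s => PySem.Set.add s canon
            | none => PySem.Set.ofList [canon]) := by
  intro f
  induction f with
  | nil => intro z y _ hy; cases hy
  | cons x t ih =>
    intro z y hnd hy
    simp only [List.foldl_cons]
    rcases List.mem_cons.mp hy with h | h
    · subst h
      have hnotin : y ∉ t := (List.nodup_cons.mp hnd).1
      rw [aFold_get_not_mem canon t _ y hnotin, aInner_get, if_pos rfl]
    · have hxy : y ≠ x := fun he => (List.nodup_cons.mp hnd).1 (he ▸ h)
      rw [ih _ y (List.nodup_cons.mp hnd).2 h, aInner_get, if_neg hxy]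

lemma aFold_keys (canon : List Int) : ∀ (f : List Int) z,
    (f.foldl (aInner canon) z).keys = PySem.Set.update z.keys f := by
  intro f
  induction f with
  | nil => intro z; rfl
  | cons x t ih =>
    intro z
    simp only [List.foldl_cons]
    rw [ih, aInner_keys, PySem.Set.update_cons]

lemma bInner_fst_get (f₀ : List Int) (p : PySem.Dict Int (PySem.Set Int) × PySem.Dict Int Int)
    (x y : Int) :
    (bInner f₀ p x).1.get? y =
      if y = x then
        some (match p.1.get? x with
              | some s => PySem.Set.update s f₀
              | none => PySem.Set.ofList f₀)
      else p.1.get? y := by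
  unfold bInner
  cases p.1.get? x <;> simp [PySem.Dict.get?_insert]

lemma bInner_snd_get (f₀ : List Int) (p : PySem.Dict Int (PySem.Set Int) × PySem.Dict Int Int)
    (x y : Int) :
    (bInner f₀ p x).2.get? y =
      if y = x then
        some (match p.1.get? x with
              | some _ => p.2.getD x 0 + 1
              | none => 1)
      else p.2.get? y := by
  unfold bInner
  cases p.1.get? x <;> simp [PySem.Dict.get?_insert]

lemma bInner_keys (f₀ : List Int) (p : PySem.Dict Int (PySem.Set Int) × PySem.Dict Int Int)
    (x : Int) :
    (bInner f₀ p x).1.keys = PySem.Set.add p.1.keys x ∧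
    (bInner f₀ p x).2.keys = PySem.Set.add p.2.keys x := by
  unfold bInner
  cases h : p.1.get? x <;> exact ⟨keys_insert_eq_add _ _ _, keys_insert_eq_add _ _ _⟩

lemma bFold_get_not_mem (f₀ : List Int) : ∀ (f : List Int) p (y : Int), y ∉ f →
    ((f.foldl (bInner f₀) p).1.get? y = p.1.get? y ∧
     (f.foldl (bInner f₀) p).2.get? y = p.2.get? y) := by
  intro f
  induction f with
  | nil => intro p y _; exact ⟨rfl, rfl⟩
  | cons x t ih =>
    intro p y hy
    have hxy : y ≠ x := fun h => hy (h ▸ List.mem_cons_self)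
    have ht : y ∉ t := fun h => hy (List.mem_cons_of_mem _ h)
    simp only [List.foldl_cons]
    obtain ⟨h1, h2⟩ := ih (bInner f₀ p x) y ht
    rw [h1, h2, bInner_fst_get, bInner_snd_get, if_neg hxy, if_neg hxy]
    exact ⟨rfl, rfl⟩

lemma bFold_get_mem (f₀ : List Int) : ∀ (f : List Int) p (y : Int), f.Nodup → y ∈ f →
    ((f.foldl (bInner f₀) p).1.get? y =
       some (match p.1.get? y with
             | some s => PySem.Set.update s f₀
             | none => PySem.Set.ofList f₀) ∧
     (f.foldl (bInner f₀) p).2.get? y =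
       some (match p.1.get? y with
             | some _ => p.2.getD y 0 + 1
             | none => 1)) := by
  intro f
  induction f with
  | nil => intro p y _ hy; cases hy
  | cons x t ih =>
    intro p y hnd hy
    simp only [List.foldl_cons]
    rcases List.mem_cons.mp hy with h | h
    · subst h
      have hnotin : y ∉ t := (List.nodup_cons.mp hnd).1
      obtain ⟨h1, h2⟩ := bFold_get_not_mem f₀ t (bInner f₀ p y) y hnotin
      rw [h1, h2, bInner_fst_get, bInner_snd_get, if_pos rfl, if_pos rfl]
      exact ⟨rfl, rfl⟩
    · have hxy : y ≠ x := fun he => (List.nodup_cons.mp hnd).1 (he ▸ h)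
      obtain ⟨h1, h2⟩ := ih (bInner f₀ p x) y (List.nodup_cons.mp hnd).2 h
      rw [h1, h2]
      simp only [bInner_fst_get, bInner_snd_get, PySem.Dict.getD_eq_get?_getD, if_neg hxy]
      exact ⟨trivial, trivial⟩

lemma bFold_keys (f₀ : List Int) : ∀ (f : List Int) p,
    ((f.foldl (bInner f₀) p).1.keys = PySem.Set.update p.1.keys f ∧
     (f.foldl (bInner f₀) p).2.keys = PySem.Set.update p.2.keys f) := by
  intro f
  induction f with
  | nil => intro p; exact ⟨rfl, rfl⟩
  | cons x t ih =>
    intro p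
    simp only [List.foldl_cons]
    obtain ⟨h1, h2⟩ := ih (bInner f₀ p x)
    rw [h1, h2, (bInner_keys f₀ p x).1, (bInner_keys f₀ p x).2,
      PySem.Set.update_cons, PySem.Set.update_cons]
    exact ⟨rfl, rfl⟩
lemma ofList_singleton {α : Type} [BEq α] [LawfulBEq α] (c : α) :
    PySem.Set.ofList [c] = [c] := by
  exact PySem.Set.ofList_eq_self_of_nodup [c] (List.nodup_singleton c)

def ZInv (z : PySem.Dict Int (PySem.Set (List Int)))
    (neigh : PySem.Dict Int (PySem.Set Int)) (count : PySem.Dict Int Int)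
    (seen : PySem.Set (List Int)) : Prop :=
  z.keys = neigh.keys ∧ z.keys = count.keys ∧ z.keys.Nodup ∧
  (∀ x s, z.get? x = some s → s ≠ [] ∧ s.Nodup ∧ ∀ c ∈ s, x ∈ c ∧ c ∈ seen) ∧
  (∀ x s, z.get? x = some s → ∃ ns, neigh.get? x = some ns ∧ ns.Nodup ∧
      (∀ a, a ∈ ns ↔ ∃ c ∈ s, a ∈ c)) ∧
  (∀ x s, z.get? x = some s → count.get? x = some (s.length : Int)) ∧
  (∀ c, c ∈ seen → ∀ x, x ∈ c → ∃ s, z.get? x = some s ∧ c ∈ s)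

lemma zinv_init : ZInv PySem.Dict.empty PySem.Dict.empty PySem.Dict.empty PySem.Set.empty := by
  refine ⟨rfl, rfl, List.nodup_nil, ?_, ?_, ?_, ?_⟩
  · intro x s h; rw [PySem.Dict.get?_empty] at h; cases h
  · intro x s h; rw [PySem.Dict.get?_empty] at h; cases h
  · intro x s h; rw [PySem.Dict.get?_empty] at h; cases h
  · intro c hc; cases hc

lemma foldl_aInner_id (canon : List Int) :
    ∀ (f : List Int) (z : PySem.Dict Int (PySem.Set (List Int))),
    (∀ x ∈ f, aInner canon z x = z) → f.foldl (aInner canon) z = z := by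
  intro f
  induction f with
  | nil => intro z _; rfl
  | cons x t ih =>
    intro z h
    simp only [List.foldl_cons]
    rw [h x List.mem_cons_self]
    exact ih z (fun y hy => h y (List.mem_cons_of_mem _ hy))

lemma zinv_step {z : PySem.Dict Int (PySem.Set (List Int))}
    {neigh : PySem.Dict Int (PySem.Set Int)} {count : PySem.Dict Int Int}
    {seen : PySem.Set (List Int)} (cla : List Int) (h : ZInv z neigh count seen) :
    ZInv (aClause z cla) (bClause (neigh, count, seen) cla).1
      (bClause (neigh, count, seen) cla).2.1 (bClause (neigh, count, seen) cla).2.2 := by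
  obtain ⟨hk1, hk2, hknd, h3, h4, h5, h6⟩ := h
  unfold aClause bClause
  have hfnd : (fsOrder (cla.map pyAbs)).Nodup := fsOrder_nodup _
  set f := fsOrder (cla.map pyAbs) with hf
  set canon := canonOf cla with hcanon
  have hmemfc : ∀ a, a ∈ canon ↔ a ∈ f := fun a => mem_canonOf
  by_cases hseen : PySem.Set.contains seen canon
  · -- clause already seen: B skips, A's loop is a no-op
    simp only [hseen, if_pos]
    have hcs : canon ∈ seen := (PySem.Set.contains_iff _ _).mp hseen
    have hz : f.foldl (aInner canon) z = z := by
      apply foldl_aInner_id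
      intro x hx
      obtain ⟨s, hget, hcmem⟩ := h6 canon hcs x ((hmemfc x).mpr hx)
      unfold aInner
      rw [hget]
      show z.insert x (PySem.Set.add s canon) = z
      rw [PySem.Set.add_of_mem hcmem]
      exact insert_get_self z x s hknd hget
    rw [hz]
    exact ⟨hk1, hk2, hknd, h3, h4, h5, h6⟩
  · -- new clause
    have hb : PySem.Set.contains seen canon = false := by simpa using hseen
    simp only [hb, Bool.false_eq_true, if_false]
    have hcnots : ∀ x s, z.get? x = some s → canon ∉ s := by
      intro x s hget hmem
      exact hseen ((PySem.Set.contains_iff _ _).mpr ((h3 x s hget).2.2 canon hmem).2)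
    -- keys
    have hak := aFold_keys canon f z
    have hbk := bFold_keys f f (neigh, count)
    refine ⟨?_, ?_, ?_, ?_, ?_, ?_, ?_⟩
    · rw [hak, hbk.1, hk1]
    · rw [hak, hbk.2, hk2]
    · rw [hak]; exact PySem.Set.nodup_update _ _ hknd
    · -- A-side per-key facts
      intro x s hget
      by_cases hx : x ∈ f
      · rw [aFold_get_mem canon f z x hfnd hx] at hget
        cases hzx : z.get? x with
        | some s0 =>
          rw [hzx] at hget
          obtain ⟨hne, hnd0, hprop⟩ := h3 x s0 hzx
          have hs : s = PySem.Set.add s0 canon := (Option.some_injective _ hget).symm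
          subst hs
          refine ⟨?_, PySem.Set.nodup_add _ _ hnd0, ?_⟩
          · rw [PySem.Set.add_eq_ite]; split
            · exact hne
            · intro hh; cases s0 <;> simp_all
          · intro c hc
            rcases (PySem.Set.mem_add _ _ _).mp hc with hc0 | hc0
            · exact ⟨(hprop c hc0).1, (PySem.Set.mem_add _ _ _).mpr (Or.inl (hprop c hc0).2)⟩
            · subst hc0
              exact ⟨(hmemfc x).mpr hx, (PySem.Set.mem_add _ _ _).mpr (Or.inr rfl)⟩
        | none =>
          rw [hzx] at hget
          have hs : s = PySem.Set.ofList [canon] := (Option.some_injective _ hget).symm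
          rw [ofList_singleton] at hs
          subst hs
          refine ⟨by simp, by simp, ?_⟩
          intro c hc
          rw [List.mem_singleton] at hc
          subst hc
          exact ⟨(hmemfc x).mpr hx, (PySem.Set.mem_add _ _ _).mpr (Or.inr rfl)⟩
      · rw [aFold_get_not_mem canon f z x hx] at hget
        obtain ⟨hne, hnd0, hprop⟩ := h3 x s hget
        exact ⟨hne, hnd0, fun c hc =>
          ⟨(hprop c hc).1, (PySem.Set.mem_add _ _ _).mpr (Or.inl (hprop c hc).2)⟩⟩
    · -- neigh relation
      intro x s hget
      by_cases hx : x ∈ f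
      · rw [aFold_get_mem canon f z x hfnd hx] at hget
        have hb1 := (bFold_get_mem f f (neigh, count) x hfnd hx).1
        cases hzx : z.get? x with
        | some s0 =>
          rw [hzx] at hget
          have hs : s = PySem.Set.add s0 canon := (Option.some_injective _ hget).symm
          subst hs
          obtain ⟨ns, hns, hnsnd, hnsmem⟩ := h4 x s0 hzx
          rw [show (neigh, count).1 = neigh from rfl, hns] at hb1
          refine ⟨PySem.Set.update ns f, hb1, PySem.Set.nodup_update _ _ hnsnd, ?_⟩
          intro a
          rw [PySem.Set.mem_update]
          constructor
          · rintro (ha | ha)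
            · obtain ⟨c, hc, hac⟩ := (hnsmem a).mp ha
              exact ⟨c, (PySem.Set.mem_add _ _ _).mpr (Or.inl hc), hac⟩
            · exact ⟨canon, (PySem.Set.mem_add _ _ _).mpr (Or.inr rfl), (hmemfc a).mpr ha⟩
          · rintro ⟨c, hc, hac⟩
            rcases (PySem.Set.mem_add _ _ _).mp hc with hc0 | hc0
            · exact Or.inl ((hnsmem a).mpr ⟨c, hc0, hac⟩)
            · subst hc0; exact Or.inr ((hmemfc a).mp hac)
        | none =>
          rw [hzx] at hget
          have hs : s = PySem.Set.ofList [canon] := (Option.some_injective _ hget).symm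
          rw [ofList_singleton] at hs
          subst hs
          have hnx : neigh.get? x = none := by
            rw [PySem.Dict.get?_eq_none_iff_not_mem_keys, ← hk1]
            exact (PySem.Dict.get?_eq_none_iff_not_mem_keys z x).mp hzx
          rw [show (neigh, count).1 = neigh from rfl, hnx] at hb1
          refine ⟨PySem.Set.ofList f, hb1, PySem.Set.nodup_ofList _, ?_⟩
          intro a
          rw [PySem.Set.mem_ofList]
          constructor
          · intro ha; exact ⟨canon, List.mem_singleton_self _, (hmemfc a).mpr ha⟩
          · rintro ⟨c, hc, hac⟩
            rw [List.mem_singleton] at hc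
            subst hc
            exact (hmemfc a).mp hac
      · rw [aFold_get_not_mem canon f z x hx] at hget
        obtain ⟨ns, hns, hnsnd, hnsmem⟩ := h4 x s hget
        have hb1 := (bFold_get_not_mem f f (neigh, count) x hx).1
        rw [show (neigh, count).1 = neigh from rfl] at hb1
        exact ⟨ns, hb1.trans hns, hnsnd, hnsmem⟩
    · -- count relation
      intro x s hget
      by_cases hx : x ∈ f
      · rw [aFold_get_mem canon f z x hfnd hx] at hget
        have hb2 := (bFold_get_mem f f (neigh, count) x hfnd hx).2
        cases hzx : z.get? x with
        | some s0 =>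
          rw [hzx] at hget
          have hs : s = PySem.Set.add s0 canon := (Option.some_injective _ hget).symm
          subst hs
          obtain ⟨ns, hns, _, _⟩ := h4 x s0 hzx
          rw [show (neigh, count).1 = neigh from rfl, show (neigh, count).2 = count from rfl,
            hns] at hb2
          have hc5 := h5 x s0 hzx
          rw [hb2, PySem.Dict.getD_eq_get?_getD, hc5]
          have hadd : PySem.Set.add s0 canon = s0 ++ [canon] :=
            PySem.Set.add_of_not_mem (hcnots x s0 hzx)
          rw [hadd]
          simp
        | none =>
          rw [hzx] at hget
          have hs : s = PySem.Set.ofList [canon] := (Option.some_injective _ hget).symm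
          rw [ofList_singleton] at hs
          subst hs
          have hnx : neigh.get? x = none := by
            rw [PySem.Dict.get?_eq_none_iff_not_mem_keys, ← hk1]
            exact (PySem.Dict.get?_eq_none_iff_not_mem_keys z x).mp hzx
          rw [show (neigh, count).1 = neigh from rfl, hnx] at hb2
          rw [hb2]
          simp
      · rw [aFold_get_not_mem canon f z x hx] at hget
        have hb2 := (bFold_get_not_mem f f (neigh, count) x hx).2
        rw [show (neigh, count).2 = count from rfl] at hb2
        rw [hb2]
        exact h5 x s hget
    · -- seen relation
      intro c hc x hxc
      rcases (PySem.Set.mem_add _ _ _).mp hc with hc0 | hc0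
      · obtain ⟨s, hget, hcs⟩ := h6 c hc0 x hxc
        by_cases hx : x ∈ f
        · rw [aFold_get_mem canon f z x hfnd hx, hget]
          exact ⟨PySem.Set.add s canon, rfl, (PySem.Set.mem_add _ _ _).mpr (Or.inl hcs)⟩
        · rw [aFold_get_not_mem canon f z x hx]
          exact ⟨s, hget, hcs⟩
      · subst hc0
        have hx : x ∈ f := (hmemfc x).mp hxc
        rw [aFold_get_mem canon f z x hfnd hx]
        cases hzx : z.get? x with
        | some s0 =>
          exact ⟨PySem.Set.add s0 canon, rfl, (PySem.Set.mem_add _ _ _).mpr (Or.inr rfl)⟩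
        | none =>
          refine ⟨PySem.Set.ofList [canon], rfl, ?_⟩
          rw [ofList_singleton]
          exact List.mem_singleton_self _
lemma zinv_fold {z : PySem.Dict Int (PySem.Set (List Int))}
    {neigh : PySem.Dict Int (PySem.Set Int)} {count : PySem.Dict Int Int}
    {seen : PySem.Set (List Int)} (formula : List (List Int)) (h : ZInv z neigh count seen) :
    ZInv (formula.foldl aClause z)
      (formula.foldl bClause (neigh, count, seen)).1
      (formula.foldl bClause (neigh, count, seen)).2.1
      (formula.foldl bClause (neigh, count, seen)).2.2 := by
  induction formula generalizing z neigh count seen with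
  | nil => exact h
  | cons cla rest ih =>
    have hstep := zinv_step (z := z) (neigh := neigh) (count := count) (seen := seen) cla h
    have := ih hstep
    simpa [List.foldl_cons] using this

lemma mem_foldl_update : ∀ (s : List (List Int)) (c0 : PySem.Set Int) (a : Int),
    (a ∈ s.foldl PySem.Set.update c0 ↔ a ∈ c0 ∨ ∃ c ∈ s, a ∈ c) := by
  intro s
  induction s with
  | nil => intro c0 a; simp
  | cons c t ih =>
    intro c0 a
    simp only [List.foldl_cons]
    rw [ih]
    rw [PySem.Set.mem_update]
    constructor
    · rintro ((h | h) | h)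
      · exact Or.inl h
      · exact Or.inr ⟨c, List.mem_cons_self, h⟩
      · obtain ⟨c', hc', ha⟩ := h
        exact Or.inr ⟨c', List.mem_cons_of_mem _ hc', ha⟩
    · rintro (h | ⟨c', hc', ha⟩)
      · exact Or.inl (Or.inl h)
      · rcases List.mem_cons.mp hc' with rfl | hc'
        · exact Or.inl (Or.inr ha)
        · exact Or.inr ⟨c', hc', ha⟩

lemma nodup_foldl_update : ∀ (s : List (List Int)) (c0 : PySem.Set Int), c0.Nodup →
    (s.foldl PySem.Set.update c0).Nodup := by
  intro s
  induction s with
  | nil => intro c0 h; exact h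
  | cons c t ih =>
    intro c0 h
    simp only [List.foldl_cons]
    exact ih _ (PySem.Set.nodup_update _ _ h)

lemma aux_fold (nc l : Int) : ∀ (s : List (List Int)) (c0 : PySem.Set Int) (a0 : Int),
    s.foldl (fun (p : PySem.Set Int × Int) c =>
        ((PySem.Set.update p.1 c), ((PySem.Set.update p.1 c).length : Int) * nc + l)) (c0, a0) =
      (s.foldl PySem.Set.update c0,
        if s = [] then a0
        else ((s.foldl PySem.Set.update c0).length : Int) * nc + l) := by
  intro s
  induction s with
  | nil => intro c0 a0; simp
  | cons c t ih =>
    intro c0 a0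
    simp only [List.foldl_cons]
    rw [ih]
    cases t with
    | nil => simp
    | cons c' t' => simp

lemma score_eq (nc : Int) {z : PySem.Dict Int (PySem.Set (List Int))}
    {neigh : PySem.Dict Int (PySem.Set Int)} {count : PySem.Dict Int Int}
    {seen : PySem.Set (List Int)} (h : ZInv z neigh count seen) :
    z.keys.foldl (fun (st : Int × Int) i =>
      let zi := z.getD i PySem.Set.empty
      let l : Int := (zi.length : Int)
      let ca := zi.foldl (fun (p : PySem.Set Int × Int) c =>
          let conj := PySem.Set.update p.1 c
          (conj, (conj.length : Int) * nc + l)) (PySem.Set.ofList [i], 0)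
      if ca.2 < st.1 then (ca.2, i) else st) (nc ^ 3, -1) =
    neigh.keys.foldl (fun (b : Int × Int) i =>
      let aux := ((neigh.getD i PySem.Set.empty).length : Int) * nc + count.getD i 0
      if aux < b.1 then (aux, i) else b) (nc ^ 3, -1) := by
  obtain ⟨hk1, hk2, hknd, h3, h4, h5, h6⟩ := h
  rw [← hk1]
  apply PySem.List.foldl_congr_mem
  intro acc i hi
  -- i is a key of z
  cases hzi : z.get? i with
  | none => exact absurd ((PySem.Dict.get?_eq_none_iff_not_mem_keys z i).mp hzi) (by simpa using hi)
  | some s =>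
    obtain ⟨hne, hsnd, hprop⟩ := h3 i s hzi
    obtain ⟨ns, hns, hnsnd, hnsmem⟩ := h4 i s hzi
    have hc5 := h5 i s hzi
    simp only []
    rw [PySem.Dict.getD_eq_get?_getD, hzi, PySem.Dict.getD_eq_get?_getD, hns,
      PySem.Dict.getD_eq_get?_getD, hc5]
    simp only [Option.getD_some]
    rw [aux_fold, if_neg hne]
    -- lengths agree: both sides are nodup lists with the same membership
    have hseed : PySem.Set.ofList [i] = [i] := ofList_singleton i
    have hmem : ∀ a, a ∈ s.foldl PySem.Set.update (PySem.Set.ofList [i]) ↔ a ∈ ns := by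
      intro a
      rw [mem_foldl_update, hnsmem, hseed, List.mem_singleton]
      constructor
      · rintro (rfl | hh)
        · obtain ⟨c, hc⟩ := List.exists_mem_of_ne_nil s hne
          exact ⟨c, hc, (hprop c hc).1⟩
        · exact hh
      · exact fun hh => Or.inr hh
    have hlen : (s.foldl PySem.Set.update (PySem.Set.ofList [i])).length = ns.length := by
      have hnd1 : (s.foldl PySem.Set.update (PySem.Set.ofList [i])).Nodup := by
        apply nodup_foldl_update
        rw [hseed]
        exact List.nodup_singleton i
      exact ((List.perm_ext_iff_of_nodup hnd1 hnsnd).mpr hmem).length_eq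
    rw [hlen]
-- ===== VERDICT (by name: the statement is the Claim_ definition above) =====
theorem obtenerVariable_spec : Claim_equal_obtenerVariable := by
  intro formula _
  unfold Spec_obtenerVariable obtenerVariable obtenerVariable_alt
  exact congrArg Prod.snd (score_eq _ (zinv_fold formula zinv_init))
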